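-- pv_equiv track=rewrite | github.com/dmackenzie1/gitlab-summarize | utils/parsing.py | path_is_version_signal
-- ===== SOURCE A (Python) =====
-- VERSION_SIGNAL_PATHS = [
--     ".nvmrc",
--     ".node-version",
--     "package.json",
--     "Dockerfile",
--     "docker/",
--     ".gitlab-ci.yml",
--     ".gitlab-ci/",
--     "pyproject.toml",
--     "requirements.txt",
--     "requirements-dev.txt",
--     "uv.lock",
--     "package-lock.json",
--     "pnpm-lock.yaml",
--     "yarn.lock",
--     "poetry.lock",
-- ]
--
-- def path_is_version_signal(path: str) -> bool:
--     normalized = path.replace("\\", "/").lstrip("./")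
--     for sig in VERSION_SIGNAL_PATHS:
--         if sig.endswith("/") and normalized.startswith(sig):
--             return True
--         if normalized == sig or normalized.endswith("/" + sig):
--             return True
--     return False
-- ===== SOURCE B (Python) =====
-- _FILE_NAMES = frozenset([
--     ".nvmrc", ".node-version", "package.json", "Dockerfile",
--     ".gitlab-ci.yml", "pyproject.toml", "requirements.txt",
--     "requirements-dev.txt", "uv.lock", "package-lock.json",
--     "pnpm-lock.yaml", "yarn.lock", "poetry.lock",
-- ])
-- _DIR_NAMES = frozenset(["docker", ".gitlab-ci"])
--
-- def path_is_version_signal(path: str) -> bool: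
--     # Split the normalized path into segments once; classify by segment positions.
--     segs = path.replace("\\", "/").lstrip("./").split("/")
--     if segs[-1] in _FILE_NAMES:
--         return True
--     if len(segs) >= 3 and segs[-1] == "" and segs[-2] in _DIR_NAMES:
--         return True
--     return len(segs) >= 2 and segs[0] in _DIR_NAMES
-- ===== Notes on version B (the rewrite author's own statement) =====
-- stated objective: alternative
-- what changed: B splits the normalized path once at the slash separators into a segment list and classifies by segment positions (last segment in a 13-name file set; first or second-to-last segment in a 2-name directory set), instead of A's scan over 15 patterns each tried for equality, suffix and directory-prefix string matching.
import Mathlib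
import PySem

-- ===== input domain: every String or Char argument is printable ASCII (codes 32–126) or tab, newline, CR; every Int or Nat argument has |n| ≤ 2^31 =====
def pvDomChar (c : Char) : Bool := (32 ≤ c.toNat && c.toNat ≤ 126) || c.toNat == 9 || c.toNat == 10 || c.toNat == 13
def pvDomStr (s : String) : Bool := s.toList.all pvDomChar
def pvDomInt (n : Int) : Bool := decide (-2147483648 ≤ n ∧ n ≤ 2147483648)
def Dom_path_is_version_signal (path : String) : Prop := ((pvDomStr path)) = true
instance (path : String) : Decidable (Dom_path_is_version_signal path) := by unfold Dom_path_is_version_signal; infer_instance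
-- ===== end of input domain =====

-- B splits the normalized path into '/'-separated segments once and classifies by segment
-- positions (last segment in a file-name set; first or second-to-last segment in a directory-name
-- set), replacing A's 15-pattern equality/prefix/suffix scan (objective: alternative).

-- normalization shared by both Pythons verbatim: path.replace("\\", "/").lstrip("./")
-- lstrip("./") ported by hand as dropWhile over the char set {'.', '/'} (exact Python semantics)
def pvNormalize (path : String) : List Char :=
  List.dropWhile (fun c => c == '.' || c == '/')
    (PySem.Chars.replace path.toList ['\\'] ['/'])

-- ===== PORT A =====
def pvVerSignals : List (List Char) :=
  [".nvmrc".toList, ".node-version".toList, "package.json".toList, "Dockerfile".toList,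
   "docker/".toList, ".gitlab-ci.yml".toList, ".gitlab-ci/".toList, "pyproject.toml".toList,
   "requirements.txt".toList, "requirements-dev.txt".toList, "uv.lock".toList,
   "package-lock.json".toList, "pnpm-lock.yaml".toList, "yarn.lock".toList, "poetry.lock".toList]

def pvLoopA (n : List Char) : List (List Char) → Bool
  | [] => false
  | sig :: rest =>
    if PySem.Chars.endswith sig ['/'] && PySem.Chars.startswith n sig then true
    else if n == sig || PySem.Chars.endswith n ('/' :: sig) then true
    else pvLoopA n rest

def path_is_version_signal (path : String) : Bool :=
  pvLoopA (pvNormalize path) pvVerSignals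

-- ===== PORT B =====
def pvFileNames : PySem.Set (List Char) :=
  PySem.Set.ofList
    [".nvmrc".toList, ".node-version".toList, "package.json".toList, "Dockerfile".toList,
     ".gitlab-ci.yml".toList, "pyproject.toml".toList, "requirements.txt".toList,
     "requirements-dev.txt".toList, "uv.lock".toList, "package-lock.json".toList,
     "pnpm-lock.yaml".toList, "yarn.lock".toList, "poetry.lock".toList]

def pvDirNames : PySem.Set (List Char) :=
  PySem.Set.ofList ["docker".toList, ".gitlab-ci".toList]

def path_is_version_signal_alt (path : String) : Bool :=
  let segs := PySem.Chars.splitOn (pvNormalize path) ['/']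
  -- segs[-1]: str.split always returns a nonempty list, so index -1 is in range (getD unreachable)
  let last := (PySem.List.pyGet? segs (-1)).getD []
  if pvFileNames.contains last then true
  else if decide (3 ≤ segs.length) && (last == ([] : List Char))
          && pvDirNames.contains ((PySem.List.pyGet? segs (-2)).getD []) then true
  else decide (2 ≤ segs.length) && pvDirNames.contains ((PySem.List.pyGet? segs 0).getD [])

-- ===== PRECONDITION & SPEC =====
def Spec_path_is_version_signal (path : String) (out : Bool) : Prop := out = path_is_version_signal_alt path
instance (path : String) (out : Bool) : Decidable (Spec_path_is_version_signal path out) := by unfold Spec_path_is_version_signal; infer_instance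

-- ===== CLAIM (what is proved, stated in full; the proofs are below) =====
def Claim_equal_path_is_version_signal : Prop := ∀ (path : String), Dom_path_is_version_signal path → Spec_path_is_version_signal path (path_is_version_signal path)

-- ===== LEMMAS AND PROOFS =====

-- the suffix of n after its last '/' (the basename; = n itself when n has no '/')
def pvLastSeg (n : List Char) : List Char :=
  (List.takeWhile (fun c => c != '/') n.reverse).reverse

-- proof-side model of normalized.split('/')
def sseg : List Char → List (List Char)
  | [] => [[]]
  | a :: r =>
    if a = '/' then [] :: sseg r
    else match sseg r with
         | [] => [[a]]
         | h :: t => (a :: h) :: t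

theorem sseg_ne_nil (l : List Char) : sseg l ≠ [] := by
  cases l with
  | nil => simp [sseg]
  | cons a r =>
    simp only [sseg]
    split_ifs
    · simp
    · cases sseg r <;> simp

theorem go_spec (fuel : Nat) (l cur : List Char) (acc : List (List Char)) (h : l.length ≤ fuel) :
    PySem.Chars.splitOn.go ['/'] fuel l cur acc =
      acc.reverse ++ (match sseg l with
        | [] => []
        | hd :: t => (cur.reverse ++ hd) :: t) := by
  induction fuel generalizing l cur acc with
  | zero =>
    have hl : l = [] := by simpa using h
    subst hl
    simp [PySem.Chars.splitOn.go, sseg]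
  | succ fuel ih =>
    cases l with
    | nil => simp [PySem.Chars.splitOn.go, sseg]
    | cons a rest =>
      simp only [PySem.Chars.splitOn.go]
      by_cases ha : a = '/'
      · subst ha
        have hp : List.isPrefixOf ['/'] ('/' :: rest) = true := by simp [List.isPrefixOf]
        rw [if_pos hp]
        simp only [List.length_nil, List.length_cons, List.drop_succ_cons, List.drop_zero]
        rw [ih rest [] (cur.reverse :: acc) (by simpa using h)]
        cases hs : sseg rest with
        | nil => exact absurd hs (sseg_ne_nil rest)
        | cons hd t =>
          simp [sseg, hs]
      · have hp : List.isPrefixOf ['/'] (a :: rest) = false := by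
          simp [List.isPrefixOf]
          exact fun hc => ha hc.symm
        rw [if_neg (by simp [hp])]
        rw [ih rest (a :: cur) acc (by simpa using h)]
        cases hs : sseg rest with
        | nil => exact absurd hs (sseg_ne_nil rest)
        | cons hd t =>
          simp [sseg, ha, hs]

theorem splitOn_slash (n : List Char) : PySem.Chars.splitOn n ['/'] = sseg n := by
  unfold PySem.Chars.splitOn
  rw [go_spec (n.length + 1) n [] [] (by omega)]
  cases hs : sseg n with
  | nil => exact absurd hs (sseg_ne_nil n)
  | cons hd t => simp

theorem sseg_no_slash {l : List Char} (h : '/' ∉ l) : sseg l = [l] := by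
  induction l with
  | nil => simp [sseg]
  | cons a r ih =>
    have ha : a ≠ '/' := fun hc => h (hc ▸ List.mem_cons_self)
    have hr : '/' ∉ r := fun hc => h (List.mem_cons_of_mem _ hc)
    simp [sseg, ha, ih hr]

theorem sseg_break {l₁ l₂ : List Char} (h : '/' ∉ l₁) :
    sseg (l₁ ++ '/' :: l₂) = l₁ :: sseg l₂ := by
  induction l₁ with
  | nil => simp [sseg]
  | cons a r ih =>
    have ha : a ≠ '/' := fun hc => h (hc ▸ List.mem_cons_self)
    have hr : '/' ∉ r := fun hc => h (List.mem_cons_of_mem _ hc)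
    simp only [List.cons_append, sseg, ha, if_false, ih hr]

theorem sseg_last {l₁ l₂ : List Char} (h : '/' ∉ l₂) :
    sseg (l₁ ++ '/' :: l₂) = sseg l₁ ++ [l₂] := by
  induction l₁ with
  | nil => simp [sseg, sseg_no_slash h]
  | cons a r ih =>
    by_cases ha : a = '/'
    · subst ha
      simp only [List.cons_append, sseg, if_pos rfl, ih]
      rfl
    · simp only [List.cons_append, sseg, ha, if_false, ih]
      cases hs : sseg r with
      | nil => exact absurd hs (sseg_ne_nil r)
      | cons hd t => simp

theorem not_mem_lastSeg (n : List Char) : '/' ∉ pvLastSeg n := by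
  intro h
  rw [pvLastSeg, List.mem_reverse] at h
  have := List.mem_takeWhile_imp h
  simp at this

theorem lastSeg_no_slash {n : List Char} (h : '/' ∉ n) : pvLastSeg n = n := by
  rw [pvLastSeg, List.takeWhile_eq_self_iff.mpr, List.reverse_reverse]
  intro x hx
  simp only [bne_iff_ne, ne_eq]
  intro hc; subst hc
  exact h (List.mem_reverse.mp hx)

theorem last_slash_decomp {n : List Char} (h : '/' ∈ n) :
    ∃ l₁, n = l₁ ++ '/' :: pvLastSeg n := by
  have hsplit := List.takeWhile_append_dropWhile (p := fun c => c != '/') (l := n.reverse)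
  cases hdrop : List.dropWhile (fun c => c != '/') n.reverse with
  | nil =>
    exfalso
    rw [hdrop, List.append_nil] at hsplit
    have : '/' ∈ n.reverse := List.mem_reverse.mpr h
    rw [← hsplit] at this
    have := List.mem_takeWhile_imp this
    simp at this
  | cons c rest =>
    have hc : (fun c => c != '/') c = false := by
      have := List.head_dropWhile_not (p := fun c => c != '/') (l := n.reverse)
      rw [hdrop] at this; simpa using this (by simp)
    simp only [bne_eq_false_iff_eq] at hc
    subst hc
    rw [hdrop] at hsplit
    refine ⟨rest.reverse, ?_⟩
    have : n.reverse = List.takeWhile (fun c => c != '/') n.reverse ++ '/' :: rest := hsplit.symm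
    calc n = n.reverse.reverse := by simp
    _ = rest.reverse ++ '/' :: pvLastSeg n := by rw [this]; simp [pvLastSeg]

theorem first_slash_decomp {n : List Char} (h : '/' ∈ n) :
    ∃ l₁ l₂, n = l₁ ++ '/' :: l₂ ∧ '/' ∉ l₁ := by
  have hsplit := List.takeWhile_append_dropWhile (p := fun c => c != '/') (l := n)
  cases hdrop : List.dropWhile (fun c => c != '/') n with
  | nil =>
    exfalso
    rw [hdrop, List.append_nil] at hsplit
    rw [← hsplit] at h
    have := List.mem_takeWhile_imp h
    simp at this
  | cons c rest =>
    have hc : (fun c => c != '/') c = false := by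
      have := List.head_dropWhile_not (p := fun c => c != '/') (l := n)
      rw [hdrop] at this; simpa using this (by simp)
    simp only [bne_eq_false_iff_eq] at hc
    subst hc
    rw [hdrop] at hsplit
    refine ⟨List.takeWhile (fun c => c != '/') n, rest, hsplit.symm, ?_⟩
    intro hm
    have := List.mem_takeWhile_imp hm
    simp at this

-- pyGet? helpers
theorem pyGet_last {α : Type} (l : List α) (h : l ≠ []) :
    PySem.List.pyGet? l (-1) = l.getLast? := by
  have hlen : 1 ≤ l.length := List.length_pos_iff.mpr h
  simp [PySem.List.pyGet?, PySem.List.pyIdx?, hlen, List.getLast?_eq_getElem?]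

theorem pyGet_pen {α : Type} (l : List α) (x : α) (h : l ≠ []) :
    PySem.List.pyGet? (l ++ [x]) (-2) = l.getLast? := by
  have hlen : 1 ≤ l.length := List.length_pos_iff.mpr h
  simp only [PySem.List.pyGet?, PySem.List.pyIdx?, List.length_append, List.length_cons,
    List.length_nil]
  rw [if_neg (by omega), if_pos (by omega)]
  simp only [Option.bind_some]
  rw [List.getLast?_eq_getElem?,
      show (l.length + 0 + 1 - (-(-2 : Int)).toNat) = l.length - 1 from by simp,
      List.getElem?_append_left (by omega)]

theorem pyGet_zero {α : Type} (a : α) (l : List α) :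
    PySem.List.pyGet? (a :: l) 0 = some a := by
  simp [PySem.List.pyGet?, PySem.List.pyIdx?]

-- the last segment of the split is the basename
theorem sseg_getLast (n : List Char) : (sseg n).getLast? = some (pvLastSeg n) := by
  by_cases h : '/' ∈ n
  · obtain ⟨l₁, hn⟩ := last_slash_decomp h
    conv_lhs => rw [hn, sseg_last (not_mem_lastSeg n)]
    simp
  · rw [sseg_no_slash h, lastSeg_no_slash h]
    simp

theorem sseg_neg_one (n : List Char) :
    (PySem.List.pyGet? (sseg n) (-1)).getD [] = pvLastSeg n := by
  rw [pyGet_last _ (sseg_ne_nil n), sseg_getLast]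
  rfl

theorem sseg_len_two_iff (n : List Char) : 2 ≤ (sseg n).length ↔ '/' ∈ n := by
  constructor
  · intro hlen
    by_contra h
    rw [sseg_no_slash h] at hlen
    simp at hlen
  · intro h
    obtain ⟨l₁, l₂, hn, h1⟩ := first_slash_decomp h
    rw [hn, sseg_break h1]
    cases hs : sseg l₂ with
    | nil => exact absurd hs (sseg_ne_nil l₂)
    | cons hd t => simp

theorem prefix_slash {d l₁ : List Char} (l₂ : List Char) (hd : '/' ∉ d) (h1 : '/' ∉ l₁) :
    d ++ ['/'] <+: l₁ ++ '/' :: l₂ ↔ d = l₁ := by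
  induction d generalizing l₁ with
  | nil =>
    cases l₁ with
    | nil => simp
    | cons b r =>
      have hb : b ≠ '/' := fun hc => h1 (hc ▸ List.mem_cons_self)
      simp only [List.nil_append, List.cons_append, List.cons_prefix_cons]
      constructor
      · rintro ⟨hc, -⟩; exact absurd hc.symm hb
      · intro hc; exact absurd hc (by simp)
  | cons a d' ih =>
    have ha : a ≠ '/' := fun hc => hd (hc ▸ List.mem_cons_self)
    have hd' : '/' ∉ d' := fun hc => hd (List.mem_cons_of_mem _ hc)
    cases l₁ with
    | nil =>
      simp only [List.cons_append, List.nil_append, List.cons_prefix_cons]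
      constructor
      · rintro ⟨hc, -⟩; exact absurd hc ha
      · intro hc; exact absurd hc (by simp)
    | cons b r =>
      have hr : '/' ∉ r := fun hc => h1 (List.mem_cons_of_mem _ hc)
      simp only [List.cons_append, List.cons_prefix_cons]
      rw [ih hd' hr]
      simp

theorem head_cond (n d : List Char) (hd : '/' ∉ d) :
    (decide (2 ≤ (sseg n).length) && ((PySem.List.pyGet? (sseg n) 0).getD [] == d)) =
      PySem.Chars.startswith n (d ++ ['/']) := by
  by_cases h : '/' ∈ n
  · obtain ⟨l₁, l₂, hn, h1⟩ := first_slash_decomp h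
    subst hn
    rw [sseg_break h1, pyGet_zero]
    have hlen : decide (2 ≤ (l₁ :: sseg l₂).length) = true := by
      cases hs : sseg l₂ with
      | nil => exact absurd hs (sseg_ne_nil l₂)
      | cons hd' t => simp [hs]
    rw [hlen, Bool.true_and]
    cases hb : (((some l₁).getD [] : List Char) == d) with
    | false =>
      symm
      rw [← Bool.not_eq_true, PySem.Chars.startswith_iff]
      intro hp
      have := (prefix_slash l₂ hd h1).mp hp
      simp only [Option.getD_some, beq_eq_false_iff_ne, ne_eq] at hb
      exact hb this.symm
    | true =>
      symm
      rw [PySem.Chars.startswith_iff]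
      simp only [Option.getD_some, beq_iff_eq] at hb
      exact (prefix_slash l₂ hd h1).mpr hb.symm
  · rw [sseg_no_slash h]
    have hfalse : PySem.Chars.startswith n (d ++ ['/']) = false := by
      rw [← Bool.not_eq_true, PySem.Chars.startswith_iff]
      intro hp
      exact h (hp.subset (by simp))
    simp [hfalse]

theorem endswith_slash_cond (l d : List Char) (hd : '/' ∉ d) :
    PySem.Chars.endswith l ('/' :: d) = (decide ('/' ∈ l) && (pvLastSeg l == d)) := by
  by_cases hm : '/' ∈ l
  · obtain ⟨m, hl⟩ := last_slash_decomp hm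
    have key : ('/' :: d) <:+ l ↔ d = pvLastSeg l := by
      rw [← List.reverse_prefix]
      have h1 : ('/' :: d).reverse = d.reverse ++ ['/'] := by simp
      have h2 : l.reverse = (pvLastSeg l).reverse ++ '/' :: m.reverse := by
        conv_lhs => rw [hl]
        simp
      rw [h1, h2, prefix_slash m.reverse (by simpa using hd)
            (by simpa using not_mem_lastSeg l)]
      constructor
      · intro hc; exact List.reverse_injective hc
      · intro hc; rw [hc]
    cases hb : ((pvLastSeg l == d) : Bool) with
    | false =>
      rw [Bool.and_false, ← Bool.not_eq_true, PySem.Chars.endswith_iff]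
      simp only [beq_eq_false_iff_ne, ne_eq] at hb
      intro hc
      exact hb (key.mp hc).symm
    | true =>
      simp only [beq_iff_eq] at hb
      rw [(PySem.Chars.endswith_iff l ('/' :: d)).mpr (key.mpr hb.symm)]
      simp [hm]
  · have hfalse : PySem.Chars.endswith l ('/' :: d) = false := by
      rw [← Bool.not_eq_true, PySem.Chars.endswith_iff]
      intro hc
      exact hm (hc.subset (by simp))
    simp [hfalse, hm]

theorem endswith_append_slash (l p : List Char) :
    PySem.Chars.endswith (l ++ ['/']) (p ++ ['/']) = PySem.Chars.endswith l p := by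
  rw [Bool.eq_iff_iff, PySem.Chars.endswith_iff, PySem.Chars.endswith_iff,
      ← List.reverse_prefix, ← List.reverse_prefix]
  simp [List.cons_prefix_cons]

theorem trail_cond (n d : List Char) (hd : '/' ∉ d) :
    ((decide (3 ≤ (sseg n).length) && ((PySem.List.pyGet? (sseg n) (-1)).getD [] == ([] : List Char)))
        && ((PySem.List.pyGet? (sseg n) (-2)).getD [] == d)) =
      PySem.Chars.endswith n ('/' :: d ++ ['/']) := by
  by_cases hm : '/' ∈ n
  · obtain ⟨l₁, hn⟩ := last_slash_decomp hm
    have hnotL := not_mem_lastSeg n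
    by_cases hL : pvLastSeg n = []
    · have hn' : n = l₁ ++ '/' :: ([] : List Char) := by rw [hn, hL]
      rw [sseg_neg_one, hL]
      conv_lhs => rw [hn', sseg_last (by simp)]
      rw [pyGet_pen _ _ (sseg_ne_nil l₁), sseg_getLast]
      have hlen2 : decide (3 ≤ (sseg l₁ ++ [([] : List Char)]).length) = decide ('/' ∈ l₁) := by
        simp only [List.length_append, List.length_cons, List.length_nil]
        rw [decide_eq_decide]
        rw [show (3 ≤ (sseg l₁).length + 1) ↔ 2 ≤ (sseg l₁).length from by omega]
        exact sseg_len_two_iff l₁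
      rw [hlen2]
      conv_rhs => rw [hn', show (l₁ ++ '/' :: ([] : List Char)) = l₁ ++ ['/'] from by simp,
                      show ('/' :: d ++ ['/'] : List Char) = ('/' :: d) ++ ['/'] from by simp,
                      endswith_append_slash, endswith_slash_cond l₁ d hd]
      simp
    · rw [sseg_neg_one]
      have hb : ((pvLastSeg n == ([] : List Char)) : Bool) = false := by
        simpa using hL
      rw [hb, Bool.and_false, Bool.false_and]
      symm
      rw [← Bool.not_eq_true, PySem.Chars.endswith_iff]
      rintro ⟨pre, hpre⟩
      have e1 : n.getLast? = some '/' := by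
        rw [← hpre]
        rw [List.getLast?_append, show ('/' :: d ++ ['/'] : List Char) = ('/' :: d) ++ ['/'] from by simp,
            List.getLast?_append]
        rfl
      obtain ⟨z, hz⟩ := Option.isSome_iff_exists.mp (List.getLast?_isSome.mpr hL)
      have hzmem : z ∈ pvLastSeg n := List.mem_of_getLast? hz
      have e2 : n.getLast? = some z := by
        conv_lhs => rw [hn]
        rw [List.getLast?_append]
        cases hL' : pvLastSeg n with
        | nil => exact absurd hL' hL
        | cons c t =>
          rw [hL'] at hz
          rw [List.getLast?_cons_cons, hz]
          rfl
      rw [e1] at e2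
      apply hnotL
      rw [show ('/' : Char) = z from (Option.some.inj e2)]
      exact hzmem
  · rw [sseg_no_slash hm]
    have hlen : (decide (3 ≤ ([n] : List (List Char)).length)) = false := by simp
    rw [hlen, Bool.false_and, Bool.false_and]
    symm
    rw [← Bool.not_eq_true, PySem.Chars.endswith_iff]
    intro hc
    exact hm (hc.subset (by simp))

theorem ite_true_or (c b : Bool) : (if c = true then true else b) = (c || b) := by
  cases c <;> simp

-- for a file signal (no '/'), "n == sig or n ends with '/'+sig" is "basename n == sig"
theorem file_cond (n sig : List Char) (h : '/' ∉ sig) :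
    (n == sig || PySem.Chars.endswith n ('/' :: sig)) = (pvLastSeg n == sig) := by
  rw [endswith_slash_cond n sig h]
  by_cases hm : '/' ∈ n
  · have hne : (n == sig) = false := by
      simp only [beq_eq_false_iff_ne, ne_eq]
      intro hc; subst hc; exact h hm
    simp [hne, hm]
  · have : pvLastSeg n = n := lastSeg_no_slash hm
    simp [hm, this]

-- "n == sig" is absorbed by "n startswith sig"
theorem dir_absorb (n sig x : List Char) (r : Bool) :
    (PySem.Chars.startswith n sig || (n == sig || (PySem.Chars.endswith n x || r))) =
    ((PySem.Chars.startswith n sig || PySem.Chars.endswith n x) || r) := by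
  cases hb : (n == sig) with
  | false => simp [Bool.or_assoc]
  | true =>
    have hn : n = sig := by simpa using hb
    subst hn
    have h1 : PySem.Chars.startswith n n = true :=
      (PySem.Chars.startswith_iff n n).mpr (List.prefix_refl n)
    simp [h1]

theorem loopA_file (n sig : List Char) (rest : List (List Char)) (h : '/' ∉ sig) :
    pvLoopA n (sig :: rest) = ((pvLastSeg n == sig) || pvLoopA n rest) := by
  have hslash : PySem.Chars.endswith sig ['/'] = false := by
    rw [← Bool.not_eq_true, PySem.Chars.endswith_iff]
    rintro ⟨pre, hpre⟩
    exact h (by rw [← hpre]; simp)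
  rw [pvLoopA, hslash]
  simp only [Bool.false_and, Bool.false_eq_true, if_false]
  rw [ite_true_or, file_cond n sig h]

theorem loopA_dir (n sig : List Char) (rest : List (List Char))
    (h : PySem.Chars.endswith sig ['/'] = true) :
    pvLoopA n (sig :: rest) =
      ((PySem.Chars.startswith n sig || PySem.Chars.endswith n ('/' :: sig)) || pvLoopA n rest) := by
  rw [pvLoopA, h]
  simp only [Bool.true_and]
  rw [ite_true_or, ite_true_or, Bool.or_assoc, dir_absorb]

theorem main_eq (n : List Char) :
    pvLoopA n pvVerSignals =
      (if pvFileNames.contains ((PySem.List.pyGet? (PySem.Chars.splitOn n ['/']) (-1)).getD []) then true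
       else if decide (3 ≤ (PySem.Chars.splitOn n ['/']).length)
               && ((PySem.List.pyGet? (PySem.Chars.splitOn n ['/']) (-1)).getD [] == ([] : List Char))
               && pvDirNames.contains ((PySem.List.pyGet? (PySem.Chars.splitOn n ['/']) (-2)).getD []) then true
       else decide (2 ≤ (PySem.Chars.splitOn n ['/']).length)
               && pvDirNames.contains ((PySem.List.pyGet? (PySem.Chars.splitOn n ['/']) 0).getD [])) := by
  rw [splitOn_slash, ite_true_or, ite_true_or]
  have hfile : pvFileNames =
      [".nvmrc".toList, ".node-version".toList, "package.json".toList, "Dockerfile".toList,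
       ".gitlab-ci.yml".toList, "pyproject.toml".toList, "requirements.txt".toList,
       "requirements-dev.txt".toList, "uv.lock".toList, "package-lock.json".toList,
       "pnpm-lock.yaml".toList, "yarn.lock".toList, "poetry.lock".toList] := by decide
  have hdir : pvDirNames = ["docker".toList, ".gitlab-ci".toList] := by decide
  rw [hfile, hdir, pvVerSignals]
  rw [loopA_file n _ _ (by decide), loopA_file n _ _ (by decide), loopA_file n _ _ (by decide),
      loopA_file n _ _ (by decide), loopA_dir n _ _ (by decide), loopA_file n _ _ (by decide),
      loopA_dir n _ _ (by decide), loopA_file n _ _ (by decide), loopA_file n _ _ (by decide),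
      loopA_file n _ _ (by decide), loopA_file n _ _ (by decide), loopA_file n _ _ (by decide),
      loopA_file n _ _ (by decide), loopA_file n _ _ (by decide), loopA_file n _ _ (by decide)]
  simp only [PySem.Set.contains_eq_listContains, List.contains_cons, List.contains_nil, Bool.or_false]
  rw [Bool.and_or_distrib_left, Bool.and_or_distrib_left]
  rw [trail_cond n ("docker".toList) (by decide), trail_cond n (".gitlab-ci".toList) (by decide),
      head_cond n ("docker".toList) (by decide), head_cond n (".gitlab-ci".toList) (by decide)]
  rw [sseg_neg_one]
  rw [show ("docker".toList ++ ['/'] : List Char) = "docker/".toList from by decide,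
      show (".gitlab-ci".toList ++ ['/'] : List Char) = ".gitlab-ci/".toList from by decide]
  simp only [pvLoopA, Bool.or_false]
  ac_rfl

-- ===== VERDICT (by name: the statement is the Claim_ definition above) =====
theorem path_is_version_signal_spec : Claim_equal_path_is_version_signal := by
  intro path _
  unfold Spec_path_is_version_signal path_is_version_signal path_is_version_signal_alt
  exact main_eq (pvNormalize path)
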